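-- pv_equiv track=rewrite | github.com/Algnite-Solutions/PaperIgnitionV1 | scripts/profile_optimizer.py | find_like_milestones
-- ===== SOURCE A (Python) =====
-- def find_like_milestones(all_sessions: list[dict], step: int = 5) -> list[tuple[int, int]]:
--     """Find checkpoints where cumulative likes hit step boundaries.
--
--     Returns list of (session_index, cumulative_likes) — we extract a profile
--     using sessions[:session_index+1] and validate on sessions after.
--     """
--     cumulative = 0
--     next_milestone = step
--     milestones = []
--
--     for i, session in enumerate(all_sessions):
--         likes_in_session = sum(1 for c in session.get("candidates", []) if c.get("label") == 1)
--         cumulative += likes_in_session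
--         if cumulative >= next_milestone:
--             milestones.append((i, cumulative))
--             next_milestone = ((cumulative // step) + 1) * step
--
--     return milestones
-- ===== SOURCE B (Python) =====
-- def find_like_milestones(all_sessions: list[dict], step: int = 5) -> list[tuple[int, int]]:
--     """Find checkpoints where cumulative likes hit step boundaries.
--
--     Milestone-driven algorithm: build the prefix-sum table of cumulative like
--     counts once, then for each milestone threshold k*step locate the first
--     session whose cumulative count reaches it by BINARY SEARCH on the
--     (nondecreasing) table, jumping the threshold past the band just reached.
--     """
--     cums = []
--     total = 0
--     for session in all_sessions:
--         total += sum(1 for c in session.get("candidates", []) if c.get("label") == 1)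
--         cums.append(total)
--
--     milestones = []
--     if not cums:
--         return milestones
--     k = 1
--     k_max = cums[-1] // step
--     while k <= k_max:
--         target = k * step
--         lo, hi = 0, len(cums) - 1
--         while lo < hi:
--             mid = (lo + hi) // 2
--             if cums[mid] >= target:
--                 hi = mid
--             else:
--                 lo = mid + 1
--         milestones.append((lo, cums[lo]))
--         k = cums[lo] // step + 1
--     return milestones
-- ===== Notes on version B (the rewrite author's own statement) =====
-- stated objective: alternative
-- what changed: A scans sessions once carrying a next_milestone threshold; B builds the prefix-sum table of cumulative likes and then iterates over milestone thresholds k*step, locating the first session reaching each threshold by binary search on the nondecreasing table and jumping the threshold past the band just reached.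
-- outside the precondition, e.g. on find_like_milestones([{}], -5): A returns [(0, 0)], B returns []; on find_like_milestones([{}], 0): A raises ZeroDivisionError, B raises ZeroDivisionError
import Mathlib
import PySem

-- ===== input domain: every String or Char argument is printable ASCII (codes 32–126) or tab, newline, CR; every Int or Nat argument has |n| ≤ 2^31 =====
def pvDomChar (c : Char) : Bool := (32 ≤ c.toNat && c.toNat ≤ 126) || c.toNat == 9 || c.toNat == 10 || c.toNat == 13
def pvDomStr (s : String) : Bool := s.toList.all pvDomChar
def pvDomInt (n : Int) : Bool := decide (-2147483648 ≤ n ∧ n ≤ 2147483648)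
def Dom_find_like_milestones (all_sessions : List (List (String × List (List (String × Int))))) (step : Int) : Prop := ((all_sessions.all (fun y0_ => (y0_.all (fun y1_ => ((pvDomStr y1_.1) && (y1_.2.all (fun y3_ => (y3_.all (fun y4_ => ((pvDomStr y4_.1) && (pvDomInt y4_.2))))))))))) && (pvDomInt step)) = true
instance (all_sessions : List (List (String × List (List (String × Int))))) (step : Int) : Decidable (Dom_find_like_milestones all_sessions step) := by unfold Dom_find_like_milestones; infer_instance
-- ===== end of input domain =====

-- B replaces A's session scan with threshold state by a milestone-driven algorithm:
-- prefix-sum table once, then binary search for the first session reaching each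
-- milestone threshold; equivalence is proved for step ≥ 1 (Pre_ excludes step ≤ 0:
-- step = 0 makes A raise ZeroDivisionError, and a negative step is outside the
-- function's natural domain of positive step boundaries).

-- ===== PORT A =====
-- sum(1 for c in session.get("candidates", []) if c.get("label") == 1)
-- (shared by both Pythons verbatim; dict lookup = first match on the assoc list)
def likeCount (session : List (String × List (List (String × Int)))) : Int :=
  (((session.find? (fun kv => kv.1 == "candidates")).map (·.2)).getD []).foldl
    (fun acc c => if (c.find? (fun kv => kv.1 == "label")).map (·.2) = some 1 then acc + 1 else acc) 0

-- the for-loop of A: state (i, cumulative, next_milestone), milestones emitted in order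
def goA (sessions : List (List (String × List (List (String × Int))))) (i cum nextM step : Int) :
    List (Int × Int) :=
  match sessions with
  | [] => []
  | s :: rest =>
    let cum' := cum + likeCount s
    if nextM ≤ cum' then
      (i, cum') :: goA rest (i + 1) cum' ((PySem.Int.floordiv cum' step + 1) * step) step
    else
      goA rest (i + 1) cum' nextM step

def find_like_milestones (all_sessions : List (List (String × List (List (String × Int))))) (step : Int) : List (Int × Int) :=
  goA all_sessions 0 0 step step

-- ===== PORT B =====
-- pass 1 of Source B: per-session cumulative like counts (prefix sums)
def goCums (sessions : List (List (String × List (List (String × Int))))) (total : Int) : List Int :=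
  match sessions with
  | [] => []
  | s :: rest =>
    let t := total + likeCount s
    t :: goCums rest t

-- Source B's inner `while lo < hi` binary search (indices always in range there, so
-- cums[mid] is pyGetD with an irrelevant default); terminates since hi - lo shrinks
def bsearch (cums : List Int) (target lo hi : Int) : Int :=
  if h : lo < hi then
    if target ≤ PySem.List.pyGetD cums (PySem.Int.floordiv (lo + hi) 2) 0 then
      bsearch cums target lo (PySem.Int.floordiv (lo + hi) 2)
    else
      bsearch cums target (PySem.Int.floordiv (lo + hi) 2 + 1) hi
  else lo
termination_by (hi - lo).toNat
decreasing_by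
  · have hm : PySem.Int.floordiv (lo + hi) 2 = (lo + hi) / 2 :=
      PySem.Int.floordiv_eq_ediv_of_pos (by norm_num)
    omega
  · have hm : PySem.Int.floordiv (lo + hi) 2 = (lo + hi) / 2 :=
      PySem.Int.floordiv_eq_ediv_of_pos (by norm_num)
    omega

-- Source B's outer `while k <= k_max` loop; fuel = k_max iterations suffices because k
-- strictly increases each round (the prefix sums are nondecreasing), proved below
def goK (cums : List Int) (step kmax k : Int) (fuel : Nat) : List (Int × Int) :=
  match fuel with
  | 0 => []
  | fuel + 1 =>
    if k ≤ kmax then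
      let lo := bsearch cums (k * step) 0 ((cums.length : Int) - 1)
      let c := PySem.List.pyGetD cums lo 0
      (lo, c) :: goK cums step kmax (PySem.Int.floordiv c step + 1) fuel
    else []

def find_like_milestones_alt (all_sessions : List (List (String × List (List (String × Int))))) (step : Int) : List (Int × Int) :=
  let cums := goCums all_sessions 0
  if cums = [] then []
  else
    let kmax := PySem.Int.floordiv (PySem.List.pyGetD cums (-1) 0) step
    goK cums step kmax 1 kmax.toNat

-- ===== PRECONDITION & SPEC =====
-- Pre_ excludes step ≤ 0 although A returns for step < 0 (and for step = 0 with an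
-- empty session list): step = 0 otherwise raises ZeroDivisionError in both programs,
-- and a non-positive step is outside the natural domain of "step boundaries".
def Pre_find_like_milestones (all_sessions : List (List (String × List (List (String × Int))))) (step : Int) : Prop :=
  1 ≤ step
instance (all_sessions : List (List (String × List (List (String × Int))))) (step : Int) : Decidable (Pre_find_like_milestones all_sessions step) := by unfold Pre_find_like_milestones; infer_instance

def pvWitness_find_like_milestones : (List (List (String × List (List (String × Int))))) × Int :=
  ([[("candidates", [[("label", 1)], [("label", 0)], [("label", 1)]])],
    [("candidates", [[("label", 1)]])]], 2)

def Spec_find_like_milestones (all_sessions : List (List (String × List (List (String × Int))))) (step : Int) (out : List (Int × Int)) : Prop := out = find_like_milestones_alt all_sessions step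
instance (all_sessions : List (List (String × List (List (String × Int))))) (step : Int) (out : List (Int × Int)) : Decidable (Spec_find_like_milestones all_sessions step out) := by unfold Spec_find_like_milestones; infer_instance

-- ===== CLAIM (what is proved, stated in full; the proofs are below) =====
def Claim_equal_find_like_milestones : Prop := ∀ (all_sessions : List (List (String × List (List (String × Int))))) (step : Int), Dom_find_like_milestones all_sessions step → Pre_find_like_milestones all_sessions step → Spec_find_like_milestones all_sessions step (find_like_milestones all_sessions step)

-- ===== LEMMAS AND PROOFS =====

-- reference function used only by the proofs: the band-change scan
-- (emit (i, c) when floor-band c // step rises above the running band)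
def goBand (cums : List Int) (i band step : Int) : List (Int × Int) :=
  match cums with
  | [] => []
  | c :: rest =>
    if band < PySem.Int.floordiv c step then (i, c) :: goBand rest (i + 1) (PySem.Int.floordiv c step) step
    else goBand rest (i + 1) band step

-- the candidate-counting fold never decreases its accumulator
lemma foldl_ge (l : List (List (String × Int))) (a : Int) :
    a ≤ l.foldl (fun acc c => if (c.find? (fun kv => kv.1 == "label")).map (·.2) = some 1 then acc + 1 else acc) a := by
  induction l generalizing a with
  | nil => simp
  | cons c rest ih =>
    simp only [List.foldl_cons]
    split_ifs with h
    · exact le_trans (by omega) (ih (a + 1))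
    · exact ih a

lemma likeCount_nonneg (s : List (String × List (List (String × Int)))) : 0 ≤ likeCount s :=
  foldl_ge _ 0

-- A = band scan (A's threshold test cumulative ≥ (band+1)*step is the band rising)
lemma goA_eq_goBand (sessions : List (List (String × List (List (String × Int)))))
    (i cum band step : Int) (hs : 1 ≤ step) :
    goA sessions i cum ((band + 1) * step) step = goBand (goCums sessions cum) i band step := by
  induction sessions generalizing i cum band with
  | nil => simp [goA, goCums, goBand]
  | cons s rest ih =>
    simp only [goA, goCums, goBand]
    have hiff : (band + 1) * step ≤ cum + likeCount s ↔
        band < PySem.Int.floordiv (cum + likeCount s) step := by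
      rw [Int.lt_iff_add_one_le, PySem.Int.le_floordiv_iff_mul_le (by omega : (0:Int) < step)]
    by_cases h : (band + 1) * step ≤ cum + likeCount s
    · rw [if_pos h, if_pos (hiff.mp h), ih]
    · rw [if_neg h, if_neg (fun hb => h (hiff.mpr hb)), ih]

-- the prefix sums are ≥ the running total and nondecreasing
lemma goCums_bounds (sessions : List (List (String × List (List (String × Int))))) (t : Int) :
    (∀ x ∈ goCums sessions t, t ≤ x) ∧ (goCums sessions t).Pairwise (· ≤ ·) := by
  induction sessions generalizing t with
  | nil => simp [goCums]
  | cons s rest ih =>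
    have hn := likeCount_nonneg s
    obtain ⟨h1, h2⟩ := ih (t + likeCount s)
    refine ⟨?_, ?_⟩
    · intro x hx
      simp only [goCums, List.mem_cons] at hx
      rcases hx with rfl | hx
      · omega
      · have := h1 x hx; omega
    · exact List.pairwise_cons.mpr ⟨fun x hx => h1 x hx, h2⟩

-- monotonicity of the prefix-sum table, in pyGetD form
lemma cums_mono (cums : List Int) (hp : cums.Pairwise (· ≤ ·)) (i j : Int)
    (h0 : 0 ≤ i) (hij : i ≤ j) (hj : j < (cums.length : Int)) :
    PySem.List.pyGetD cums i 0 ≤ PySem.List.pyGetD cums j 0 := by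
  rw [PySem.List.pyGetD_eq_getElem cums 0 h0 (by omega),
      PySem.List.pyGetD_eq_getElem cums 0 (by omega) hj]
  rcases eq_or_lt_of_le hij with h | h
  · subst h; exact le_refl _
  · exact (List.pairwise_iff_getElem.mp hp) i.toNat j.toNat (by omega) (by omega) (by omega)

-- binary-search correctness: returns the least in-range index with value ≥ target
lemma bsearch_spec (cums : List Int) (target lo hi : Int)
    (hmono : ∀ i j : Int, 0 ≤ i → i ≤ j → j < (cums.length : Int) →
      PySem.List.pyGetD cums i 0 ≤ PySem.List.pyGetD cums j 0)
    (h0 : 0 ≤ lo) (hlh : lo ≤ hi) (hhi : hi < (cums.length : Int))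
    (hlow : ∀ j : Int, 0 ≤ j → j < lo → PySem.List.pyGetD cums j 0 < target)
    (hhigh : target ≤ PySem.List.pyGetD cums hi 0) :
    lo ≤ bsearch cums target lo hi ∧ bsearch cums target lo hi ≤ hi ∧
    target ≤ PySem.List.pyGetD cums (bsearch cums target lo hi) 0 ∧
    ∀ j : Int, 0 ≤ j → j < bsearch cums target lo hi → PySem.List.pyGetD cums j 0 < target := by
  rw [bsearch]
  by_cases h : lo < hi
  · rw [dif_pos h]
    have hm : PySem.Int.floordiv (lo + hi) 2 = (lo + hi) / 2 :=
      PySem.Int.floordiv_eq_ediv_of_pos (by norm_num)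
    by_cases hc : target ≤ PySem.List.pyGetD cums (PySem.Int.floordiv (lo + hi) 2) 0
    · rw [if_pos hc]
      have := bsearch_spec cums target lo (PySem.Int.floordiv (lo + hi) 2) hmono h0
        (by omega) (by omega) hlow hc
      exact ⟨this.1, by omega, this.2.2⟩
    · rw [if_neg hc]
      have hlt : PySem.List.pyGetD cums (PySem.Int.floordiv (lo + hi) 2) 0 < target := not_le.mp hc
      have hlow' : ∀ j : Int, 0 ≤ j → j < PySem.Int.floordiv (lo + hi) 2 + 1 →
          PySem.List.pyGetD cums j 0 < target := by
        intro j hj0 hj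
        exact lt_of_le_of_lt (hmono j _ hj0 (by omega) (by omega)) hlt
      have := bsearch_spec cums target (PySem.Int.floordiv (lo + hi) 2 + 1) hi hmono
        (by omega) (by omega) hhi hlow' hhigh
      exact ⟨by omega, this.2.1, this.2.2⟩
  · rw [dif_neg h]
    have : lo = hi := le_antisymm hlh (not_lt.mp h)
    subst this
    exact ⟨le_refl _, le_refl _, hhigh, hlow⟩
termination_by (hi - lo).toNat
decreasing_by
  · omega
  · omega

-- band scan: the first triggering position splits the scan
lemma goBand_emit (cums : List Int) (r : Nat) (i b step : Int) (hr : r < cums.length)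
    (hlow : ∀ j : Nat, (hj : j < cums.length) → j < r → PySem.Int.floordiv cums[j] step ≤ b)
    (hhit : b < PySem.Int.floordiv cums[r] step) :
    goBand cums i b step =
      (i + r, cums[r]) :: goBand (cums.drop (r + 1)) (i + r + 1) (PySem.Int.floordiv cums[r] step) step := by
  induction cums generalizing r i with
  | nil => simp at hr
  | cons c rest ih =>
    match r with
    | 0 =>
      simp only [List.getElem_cons_zero] at hhit ⊢
      simp [goBand, if_pos hhit]
    | r + 1 =>
      have hle : PySem.Int.floordiv c step ≤ b := hlow 0 (by simp) (by omega)
      simp only [List.getElem_cons_succ] at hhit ⊢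
      rw [goBand, if_neg (by omega)]
      rw [ih r (i + 1) (by simpa using hr)
        (fun j hj hjr => hlow (j + 1) (by simpa using hj) (by omega)) hhit]
      simp only [List.drop_succ_cons]
      congr 2 <;> push_cast <;> ring

-- band scan: a prefix that never triggers can be skipped
lemma goBand_skip (m : Nat) (cums : List Int) (i b step : Int)
    (hlow : ∀ j : Nat, (hj : j < cums.length) → j < m → PySem.Int.floordiv cums[j] step ≤ b) :
    goBand cums i b step = goBand (cums.drop m) (i + m) b step := by
  induction m generalizing cums i with
  | zero => simp
  | succ m ih =>
    match cums with
    | [] => simp [goBand]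
    | c :: rest =>
      have h0 := hlow 0 (by simp) (by omega)
      simp only [List.getElem_cons_zero] at h0
      rw [goBand, if_neg (by omega)]
      rw [ih rest (i + 1) (fun j hj hjm => hlow (j + 1) (by simpa using hj) (by omega))]
      simp only [List.drop_succ_cons]
      congr 1
      push_cast; ring

-- floor-division by a positive step is monotone in the numerator
lemma floordiv_mono (x y step : Int) (hs : 1 ≤ step) (hxy : x ≤ y) :
    PySem.Int.floordiv x step ≤ PySem.Int.floordiv y step := by
  rw [PySem.Int.le_floordiv_iff_mul_le (by omega : (0:Int) < step)]
  have h1 := PySem.Int.floordiv_mul_add_mod x step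
  have h2 : 0 ≤ PySem.Int.mod x step := PySem.Int.mod_nonneg x (by omega : (0:Int) < step)
  omega

-- the band scan emits nothing once the running band reaches the last band
lemma goBand_empty (cums : List Int) (step b : Int) (hs : 1 ≤ step) (hne : cums ≠ [])
    (hp : cums.Pairwise (· ≤ ·))
    (hb : PySem.Int.floordiv (PySem.List.pyGetD cums (-1) 0) step ≤ b) (i : Int) :
    goBand cums i b step = [] := by
  rw [PySem.List.pyGetD_neg_one cums 0 hne, List.getLast_eq_getElem] at hb
  rw [goBand_skip cums.length cums i b step ?_]
  · simp [goBand]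
  · intro j hj _
    have hle : cums[j] ≤ cums[cums.length - 1] := by
      rcases Nat.lt_or_ge j (cums.length - 1) with h | h
      · exact List.pairwise_iff_getElem.mp hp j (cums.length - 1) (by omega) (by omega) h
      · have : j = cums.length - 1 := by omega
        subst this; exact le_refl _
    exact le_trans (floordiv_mono _ _ _ hs hle) hb

-- cums[-1] is cums[len(cums)-1]
lemma pyGetD_last (cums : List Int) (hne : cums ≠ []) :
    PySem.List.pyGetD cums ((cums.length : Int) - 1) 0 = PySem.List.pyGetD cums (-1) 0 := by
  have hlen : 0 < cums.length := List.length_pos_iff.mpr hne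
  rw [PySem.List.pyGetD_neg_one cums 0 hne, List.getLast_eq_getElem,
      PySem.List.pyGetD_eq_getElem cums 0 (by omega) (by omega)]
  congr 1
  omega

-- main bridge: B's threshold loop computes the band scan from band k-1
lemma goK_eq_goBand (fuel : Nat) (cums : List Int) (step kmax k : Int)
    (hs : 1 ≤ step) (hne : cums ≠ [])
    (hp : cums.Pairwise (· ≤ ·))
    (hkmax : kmax = PySem.Int.floordiv (PySem.List.pyGetD cums (-1) 0) step)
    (hfuel : (kmax - k + 1).toNat ≤ fuel) :
    goK cums step kmax k fuel = goBand cums 0 (k - 1) step := by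
  induction fuel generalizing k with
  | zero =>
    have hk : kmax < k := by omega
    rw [goK, goBand_empty cums step (k - 1) hs hne hp (by omega) 0]
  | succ fuel ih =>
    rw [goK]
    by_cases hk : k ≤ kmax
    · rw [if_pos hk]
      have hlen : 0 < cums.length := List.length_pos_iff.mpr hne
      have hmono := cums_mono cums hp
      have hhigh : k * step ≤ PySem.List.pyGetD cums ((cums.length : Int) - 1) 0 := by
        rw [pyGetD_last cums hne]
        rw [hkmax] at hk
        exact (PySem.Int.le_floordiv_iff_mul_le (by omega : (0:Int) < step)).mp hk
      obtain ⟨hr0, hrhi, hrtar, hrlow⟩ := bsearch_spec cums (k * step) 0 ((cums.length : Int) - 1)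
        hmono (le_refl 0) (by omega) (by omega) (by omega) hhigh
      set r := bsearch cums (k * step) 0 ((cums.length : Int) - 1) with hrdef
      have hrlt : r.toNat < cums.length := by omega
      have hcval : PySem.List.pyGetD cums r 0 = cums[r.toNat] :=
        PySem.List.pyGetD_eq_getElem cums 0 (by omega) (by omega)
      have hband : k - 1 < PySem.Int.floordiv cums[r.toNat] step := by
        have : k ≤ PySem.Int.floordiv cums[r.toNat] step := by
          rw [PySem.Int.le_floordiv_iff_mul_le (by omega : (0:Int) < step)]
          rw [hcval] at hrtar; exact hrtar
        omega
      have hlowband : ∀ j : Nat, (hj : j < cums.length) → j < r.toNat →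
          PySem.Int.floordiv cums[j] step ≤ k - 1 := by
        intro j hj hjr
        have := hrlow j (by omega) (by omega)
        rw [PySem.List.pyGetD_eq_getElem cums 0 (by omega) (by omega)] at this
        simp only [Int.toNat_natCast] at this
        have := (PySem.Int.floordiv_lt_iff_lt_mul (by omega : (0:Int) < step)).mpr this
        omega
      rw [goBand_emit cums r.toNat 0 (k - 1) step hrlt hlowband hband]
      have hskip : goBand cums 0 (PySem.Int.floordiv cums[r.toNat] step) step =
          goBand (cums.drop (r.toNat + 1)) (0 + (r.toNat + 1) : Int) (PySem.Int.floordiv cums[r.toNat] step) step := by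
        refine goBand_skip (r.toNat + 1) cums 0 _ step ?_
        intro j hj hjr
        refine floordiv_mono _ _ _ hs ?_
        rcases Nat.lt_or_ge j r.toNat with h | h
        · exact List.pairwise_iff_getElem.mp hp j r.toNat (by omega) (by omega) h
        · have : j = r.toNat := by omega
          subst this; exact le_refl _
      have hk' : PySem.Int.floordiv cums[r.toNat] step + 1 - 1 = PySem.Int.floordiv cums[r.toNat] step := by omega
      show ((r, PySem.List.pyGetD cums r 0) ::
          goK cums step kmax (PySem.Int.floordiv (PySem.List.pyGetD cums r 0) step + 1) fuel) = _
      rw [hcval, ih (PySem.Int.floordiv cums[r.toNat] step + 1) (by omega), hk', hskip]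
      congr 2
      omega
    · rw [if_neg hk]
      rw [goBand_empty cums step (k - 1) hs hne hp (by omega) 0]

-- ===== VERDICT (by name: the statement is the Claim_ definition above) =====
theorem find_like_milestones_spec : Claim_equal_find_like_milestones := by
  intro all_sessions step _ hpre
  unfold Spec_find_like_milestones find_like_milestones find_like_milestones_alt
  have hA := goA_eq_goBand all_sessions 0 0 0 step hpre
  simp only [zero_add, one_mul] at hA
  rw [hA]
  by_cases hcn : goCums all_sessions 0 = []
  · simp [hcn, goBand]
  · simp only [if_neg hcn]
    rw [goK_eq_goBand _ _ _ _ _ hpre hcn (goCums_bounds all_sessions 0).2 rfl (by omega)]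
    norm_num
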